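-- pv_equiv track=rewrite | github.com/wattaihei/ProgrammingContest | AtCoder/500/CODEFES2017_C.py | dfs
-- ===== SOURCE A (Python) =====
-- def dfs(which, i, l, p):
--     if i == len(which):
--         p.append(l)
--         return p
--     t = which[i]
--     p = dfs(which, i+1, l+[t], p)
--     p = dfs(which, i+1, l+[24-t], p)
--     return p
-- ===== SOURCE B (Python) =====
-- # B: iterative breadth-first enumeration of all sign-choice suffixes instead of A's
-- # binary recursion; same return value (A additionally mutates p/aliases l in place,
-- # B is pure -- equivalence here is about the return value only).
-- def dfs(which, i, l, p):
--     pats = [[]]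
--     for k in range(len(which) - i):
--         t = which[i + k]
--         pats = [row + [v] for row in pats for v in (t, 24 - t)]
--     return p + [l + row for row in pats]
-- ===== Notes on version B (the rewrite author's own statement) =====
-- stated objective: alternative
-- what changed: Replaces A's binary recursion (two recursive calls per position, threading the accumulator p) with an iterative breadth-first product: one loop that doubles a list of partial suffix rows per position, then one comprehension attaching l and p; B is pure where A mutates p in place.
import Mathlib
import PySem

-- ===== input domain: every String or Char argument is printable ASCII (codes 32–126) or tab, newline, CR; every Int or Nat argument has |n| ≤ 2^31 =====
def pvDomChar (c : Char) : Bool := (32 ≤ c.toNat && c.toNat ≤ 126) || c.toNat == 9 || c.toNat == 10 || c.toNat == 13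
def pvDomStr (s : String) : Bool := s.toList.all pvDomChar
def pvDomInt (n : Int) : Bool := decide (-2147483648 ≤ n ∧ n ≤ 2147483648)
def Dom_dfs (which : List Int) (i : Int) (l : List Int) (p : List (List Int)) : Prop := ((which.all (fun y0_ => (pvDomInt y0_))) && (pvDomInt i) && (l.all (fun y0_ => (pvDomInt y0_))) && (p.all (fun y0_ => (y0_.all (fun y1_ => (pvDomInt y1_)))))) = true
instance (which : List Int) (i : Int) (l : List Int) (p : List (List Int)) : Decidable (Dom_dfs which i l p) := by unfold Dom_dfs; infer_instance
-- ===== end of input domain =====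

-- B replaces A's binary recursion by an iterative breadth-first product over the remaining
-- positions; return values agree (A also mutates p in place / aliases l, B is pure — the
-- equivalence proved here is about the return value only).

-- ===== PORT A =====
-- literal port of A's recursion; the `none` branch is Python's IndexError (excluded by Pre_)
def dfs (which : List Int) (i : Int) (l : List Int) (p : List (List Int)) : List (List Int) :=
  if i = (which.length : Int) then p ++ [l]
  else
    match h : PySem.List.pyGet? which i with
    | none => p
    | some t => dfs which (i + 1) (l ++ [24 - t]) (dfs which (i + 1) (l ++ [t]) p)
termination_by ((which.length : Int) - i).toNat
decreasing_by
  all_goals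
    have hin : PySem.Raise.InRange which.length i := by
      by_contra hc
      rw [← PySem.List.pyGet?_eq_none_iff] at hc
      simp [hc] at h
    simp [PySem.Raise.InRange] at hin
    omega

-- ===== PORT B =====
-- step of B's `for k in range(len(which) - i)` loop over the partial-suffix rows
def dfsStep (which : List Int) (i : Int) (pats : List (List Int)) (k : Nat) : List (List Int) :=
  let t := PySem.List.pyGetD which (i + (k : Int)) 0
  pats.flatMap (fun row => [row ++ [t], row ++ [24 - t]])

def dfs_alt (which : List Int) (i : Int) (l : List Int) (p : List (List Int)) : List (List Int) :=
  let pats := (List.range ((which.length : Int) - i).toNat).foldl (dfsStep which i) [[]]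
  p ++ pats.map (fun row => l ++ row)

-- ===== PRECONDITION & SPEC =====
-- Pre_: exactly the inputs where Python A returns (outside it A raises IndexError)
def Pre_dfs (which : List Int) (i : Int) (l : List Int) (p : List (List Int)) : Prop :=
  -(which.length : Int) ≤ i ∧ i ≤ (which.length : Int)
instance (which : List Int) (i : Int) (l : List Int) (p : List (List Int)) : Decidable (Pre_dfs which i l p) := by unfold Pre_dfs; infer_instance

def pvWitness_dfs : List Int × Int × List Int × List (List Int) := ([3, 5], 0, [], [])

def Spec_dfs (which : List Int) (i : Int) (l : List Int) (p : List (List Int)) (out : List (List Int)) : Prop := out = dfs_alt which i l p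
instance (which : List Int) (i : Int) (l : List Int) (p : List (List Int)) (out : List (List Int)) : Decidable (Spec_dfs which i l p out) := by unfold Spec_dfs; infer_instance

-- ===== CLAIM (what is proved, stated in full; the proofs are below) =====
def Claim_equal_dfs : Prop := ∀ (which : List Int) (i : Int) (l : List Int) (p : List (List Int)), Dom_dfs which i l p → Pre_dfs which i l p → Spec_dfs which i l p (dfs which i l p)

-- ===== LEMMAS AND PROOFS =====

-- an in-range pyGet? returns the pyGetD value
theorem pyGet?_eq_some_pyGetD (xs : List Int) (i : Int)
    (h1 : -(xs.length : Int) ≤ i) (h2 : i < (xs.length : Int)) :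
    PySem.List.pyGet? xs i = some (PySem.List.pyGetD xs i 0) := by
  by_cases h : 0 ≤ i
  · rw [PySem.List.pyGet?_eq_some_getElem xs h h2, PySem.List.pyGetD_eq_getElem xs 0 h h2]
  · have hk : i = -(((-i).toNat : Nat) : Int) := by omega
    rw [hk, PySem.List.pyGet?_neg_natCast xs _ (by omega) (by omega),
      PySem.List.pyGetD_neg_natCast xs _ 0 (by omega) (by omega),
      List.getElem?_eq_getElem (by omega)]

-- shifting the start index by one along a `Nat.succ`-mapped range
theorem foldl_dfsStep_shift (which : List Int) : ∀ (ks : List Nat) (i : Int) (acc : List (List Int)),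
    (ks.map Nat.succ).foldl (dfsStep which i) acc = ks.foldl (dfsStep which (i + 1)) acc := by
  intro ks
  induction ks with
  | nil => intro i acc; rfl
  | cons k ks ih =>
      intro i acc
      simp only [List.map_cons, List.foldl_cons]
      rw [ih]
      congr 1
      simp only [dfsStep]
      have : i + ((Nat.succ k : Nat) : Int) = i + 1 + (k : Int) := by push_cast; ring
      rw [this]

-- the fold distributes over concatenation of the accumulator
theorem foldl_dfsStep_append (which : List Int) : ∀ (ks : List Nat) (i : Int) (a b : List (List Int)),
    ks.foldl (dfsStep which i) (a ++ b) =
      ks.foldl (dfsStep which i) a ++ ks.foldl (dfsStep which i) b := by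
  intro ks
  induction ks with
  | nil => intro i a b; rfl
  | cons k ks ih =>
      intro i a b
      simp only [List.foldl_cons]
      rw [← ih]
      congr 1
      simp [dfsStep]

-- the fold commutes with prefixing every row
theorem foldl_dfsStep_map (which : List Int) : ∀ (ks : List Nat) (i : Int) (pre : List Int) (pats : List (List Int)),
    ks.foldl (dfsStep which i) (pats.map (fun r => pre ++ r)) =
      (ks.foldl (dfsStep which i) pats).map (fun r => pre ++ r) := by
  intro ks
  induction ks with
  | nil => intro i pre pats; rfl
  | cons k ks ih =>
      intro i pre pats
      simp only [List.foldl_cons]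
      rw [← ih]
      congr 1
      simp [dfsStep, List.flatMap_map, List.map_flatMap]

theorem dfs_eq_alt (which : List Int) : ∀ (n : Nat) (i : Int) (l : List Int) (p : List (List Int)),
    -(which.length : Int) ≤ i → i ≤ (which.length : Int) →
    ((which.length : Int) - i).toNat = n →
    dfs which i l p =
      p ++ ((List.range n).foldl (dfsStep which i) [[]]).map (fun r => l ++ r) := by
  intro n
  induction n with
  | zero =>
      intro i l p h1 h2 hn
      have : i = (which.length : Int) := by omega
      subst this
      rw [dfs]
      simp
  | succ m ih =>
      intro i l p h1 h2 hn
      have hlt : i < (which.length : Int) := by omega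
      have hne : ¬ i = (which.length : Int) := by omega
      have hget := pyGet?_eq_some_pyGetD which i h1 hlt
      set t := PySem.List.pyGetD which i 0 with ht
      rw [dfs, if_neg hne]
      split
      · next heq => rw [hget] at heq; cases heq
      next t' heq =>
      rw [hget] at heq
      injection heq with heq'
      subst heq'
      rw [ih (i + 1) (l ++ [t]) p (by omega) (by omega) (by omega),
          ih (i + 1) (l ++ [24 - t]) _ (by omega) (by omega) (by omega)]
      -- reshape the RHS fold
      rw [List.range_succ_eq_map, List.foldl_cons, foldl_dfsStep_shift]
      have hstep0 : dfsStep which i [[]] 0 = [[t], [24 - t]] := by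
        simp [dfsStep, ht]
      rw [hstep0]
      have hsplit : ([[t], [24 - t]] : List (List Int)) = [[t]] ++ [[24 - t]] := rfl
      rw [hsplit, foldl_dfsStep_append]
      have h1' : ([[t]] : List (List Int)) = ([[]] : List (List Int)).map (fun r => [t] ++ r) := by simp
      have h2' : ([[24 - t]] : List (List Int)) = ([[]] : List (List Int)).map (fun r => [24 - t] ++ r) := by simp
      rw [h1', h2', foldl_dfsStep_map, foldl_dfsStep_map]
      simp [List.map_map, Function.comp_def, List.append_assoc]

-- ===== VERDICT (by name: the statement is the Claim_ definition above) =====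
theorem dfs_spec : Claim_equal_dfs := by
  intro which i l p _ hpre
  unfold Spec_dfs dfs_alt
  exact dfs_eq_alt which _ i l p hpre.1 hpre.2 rfl
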